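-- pv_equiv track=rewrite | github.com/Pengjp/lc | dp/picking_cards.py | windp
-- ===== SOURCE A (Python) =====
-- def windp(arr):
--     N = len(arr)
--     f = [[0 for _ in range(N)] for _ in range(N)]
--     s = [[0 for _ in range(N)] for _ in range(N)]
--
--     # 补充f的对角线
--     for i in range(N):
--         f[i][i] = arr[i]
--     # 0,0 右下方移动已经填好
--     # 0,1
--     # 0,2
--     # 0, N-1
--     for col in range(1,N):
--         # 对角线的出发位置 0，col
--         L = 0
--         R = col
--         while L < N and R < N:
--             # 填写过程和递归函数保持一致
--             f[L][R] = max(arr[L] + s[L+1][R], arr[R] + s[L][R-1])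
--             s[L][R] = min(f[L+1][R], f[L][R-1])
--             # 右下角移动，两边都加一
--             L += 1
--             R += 1
--     return max(f[0][N-1], s[0][N-1])
-- ===== SOURCE B (Python) =====
-- def windp(arr):
--     # Different algorithm: single "score difference" DP d(L,R) = first(L,R) - second(L,R),
--     # with the recurrence d = max(arr[L] - d(L+1,R), arr[R] - d(L,R-1)); the winner's score
--     # is then recovered in closed form as (sum(arr) + abs(d)) // 2, since first + second = sum.
--     N = len(arr)
--     d = list(arr)
--     for length in range(2, N + 1):
--         d = [max(arr[L] - d[L + 1], arr[L + length - 1] - d[L])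
--              for L in range(N - length + 1)]
--     return (sum(arr) + abs(d[0])) // 2
-- ===== Notes on version B (the rewrite author's own statement) =====
-- stated objective: alternative
-- what changed: B replaces A's two mutually-recursive N x N tables (first- and second-player values) by a single 1-D difference DP d = first - second with recurrence max(arr[L]-d, arr[R]-d), and recovers the winner's score in closed form as (sum(arr)+abs(d))//2 using first+second = interval sum.
import Mathlib
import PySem

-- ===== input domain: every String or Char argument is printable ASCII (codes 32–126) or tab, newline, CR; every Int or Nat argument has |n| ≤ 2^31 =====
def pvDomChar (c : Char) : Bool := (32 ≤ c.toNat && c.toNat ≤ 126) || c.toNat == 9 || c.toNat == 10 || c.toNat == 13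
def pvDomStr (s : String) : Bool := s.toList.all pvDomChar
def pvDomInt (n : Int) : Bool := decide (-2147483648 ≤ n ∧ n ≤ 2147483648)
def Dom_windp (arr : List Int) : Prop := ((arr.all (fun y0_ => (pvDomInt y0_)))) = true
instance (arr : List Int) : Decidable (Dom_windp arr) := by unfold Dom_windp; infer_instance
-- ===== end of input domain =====

-- B replaces A's two mutually-recursive N×N tables by a single 1-D "score difference" DP
-- d = first - second, recovering the winner's score as (sum(arr) + |d|) // 2.

-- ===== PORT A =====
-- arr[i] for an index that is provably 0 ≤ i < len(arr) at every use inside the admitted domain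
def pvIdx (xs : List Int) (i : Int) : Int := PySem.List.pyGetD xs i 0

-- m[i][j] read (indices nonnegative at every use)
def pvGet2 (m : List (List Int)) (i j : Int) : Int :=
  PySem.List.pyGetD (PySem.List.pyGetD m i []) j 0

-- m[i][j] = v ; in A the indices are always nonnegative and in range, where .toNat/List.set are exact
def pvSet2 (m : List (List Int)) (i j : Int) (v : Int) : List (List Int) :=
  m.modify i.toNat (fun row => row.set j.toNat v)

-- the 'while L < N and R < N' loop; fuel bounds the iteration count (≤ N in A)
def windpWhile (arr : List Int) (N : Int) :
    Nat → Int → Int → List (List Int) → List (List Int) → List (List Int) × List (List Int)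
  | 0, _, _, f, s => (f, s)
  | fuel + 1, L, R, f, s =>
    if L < N ∧ R < N then
      let f' := pvSet2 f L R (max (pvIdx arr L + pvGet2 s (L + 1) R)
                                  (pvIdx arr R + pvGet2 s L (R - 1)))
      let s' := pvSet2 s L R (min (pvGet2 f' (L + 1) R) (pvGet2 f' L (R - 1)))
      windpWhile arr N fuel (L + 1) (R + 1) f' s'
    else (f, s)

def windp (arr : List Int) : Int :=
  let N : Int := arr.length
  let f0 := List.replicate arr.length (List.replicate arr.length (0 : Int))
  let s0 := List.replicate arr.length (List.replicate arr.length (0 : Int))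
  let f1 := (PySem.List.pyRange 0 N).foldl (fun f i => pvSet2 f i i (pvIdx arr i)) f0
  let fs := (PySem.List.pyRange 1 N).foldl
    (fun (fs : List (List Int) × List (List Int)) col =>
      windpWhile arr N arr.length 0 col fs.1 fs.2) (f1, s0)
  max (pvGet2 fs.1 0 (N - 1)) (pvGet2 fs.2 0 (N - 1))

-- ===== PORT B =====
def windp_alt (arr : List Int) : Int :=
  let N : Int := arr.length
  let d := (PySem.List.pyRange 2 (N + 1)).foldl
    (fun (d : List Int) len =>
      (PySem.List.pyRange 0 (N - len + 1)).map (fun L =>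
        max (pvIdx arr L - pvIdx d (L + 1)) (pvIdx arr (L + len - 1) - pvIdx d L)))
    arr
  PySem.Int.floordiv (arr.sum + |pvIdx d 0|) 2

-- ===== PRECONDITION & SPEC =====
-- On the empty list both Pythons raise IndexError (reading entry [0] of an empty table); Pre_ excludes exactly that.
def Pre_windp (arr : List Int) : Prop := arr ≠ []
instance (arr : List Int) : Decidable (Pre_windp arr) := by unfold Pre_windp; infer_instance

def pvWitness_windp : List Int := [3, 1, 2]

def Spec_windp (arr : List Int) (out : Int) : Prop := out = windp_alt arr
instance (arr : List Int) (out : Int) : Decidable (Spec_windp arr out) := by unfold Spec_windp; infer_instance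

-- ===== CLAIM (what is proved, stated in full; the proofs are below) =====
def Claim_equal_windp : Prop := ∀ (arr : List Int), Dom_windp arr → Pre_windp arr → Spec_windp arr (windp arr)

-- ===== LEMMAS AND PROOFS =====

-- the game values: Fm arr g L / Sm arr g L = first/second player's value of interval [L, L+g]
mutual
def Fm (arr : List Int) : Nat → Nat → Int
  | 0, L => arr.getD L 0
  | g + 1, L => max (arr.getD L 0 + Sm arr g (L + 1)) (arr.getD (L + g + 1) 0 + Sm arr g L)
def Sm (arr : List Int) : Nat → Nat → Int
  | 0, _ => 0
  | g + 1, L => min (Fm arr g (L + 1)) (Fm arr g L)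
end

-- Nat-index reads
def get2N (m : List (List Int)) (i j : Nat) : Int := (m.getD i []).getD j 0

lemma pvGet2_natCast (m : List (List Int)) (i j : Nat) :
    pvGet2 m (i : Int) (j : Int) = get2N m i j := by
  simp [pvGet2, get2N, PySem.List.pyGetD_natCast]

lemma pvIdx_natCast (xs : List Int) (i : Nat) : pvIdx xs (i : Int) = xs.getD i 0 := by
  simp [pvIdx, PySem.List.pyGetD_natCast]

def shapeP (N : Nat) (m : List (List Int)) : Prop :=
  m.length = N ∧ ∀ a, a < N → (m.getD a []).length = N

lemma shapeP_set2 {N : Nat} {m : List (List Int)} (h : shapeP N m) (i j : Nat) (v : Int) :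
    shapeP N (pvSet2 m (i : Int) (j : Int) v) := by
  obtain ⟨h1, h2⟩ := h
  refine ⟨by simp [pvSet2, h1], fun a ha => ?_⟩
  simp only [pvSet2, Int.toNat_natCast, List.getD_eq_getElem?_getD, List.getElem?_modify]
  rcases hm : m[a]? with _ | row
  · simp at hm; omega
  · have := h2 a ha
    simp only [List.getD_eq_getElem?_getD, hm] at this
    simp only [Option.getD_some] at this
    by_cases hia : i = a <;> simp [hia, this]

lemma get2N_set2_eq {N : Nat} {m : List (List Int)} (h : shapeP N m) {i j : Nat}
    (hi : i < N) (hj : j < N) (v : Int) :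
    get2N (pvSet2 m (i : Int) (j : Int) v) i j = v := by
  obtain ⟨h1, h2⟩ := h
  have hrow := h2 i hi
  rcases hm : m[i]? with _ | row
  · simp at hm; omega
  · simp only [List.getD_eq_getElem?_getD, hm] at hrow
    simp only [get2N, pvSet2, Int.toNat_natCast, List.getD_eq_getElem?_getD,
      List.getElem?_modify, hm, Option.map_eq_map, Option.map_some,
      Option.getD_some]
    simp only [Option.getD_some] at hrow
    simp only [if_true, List.getElem?_set]
    simp [hrow, hj]

lemma get2N_set2_ne {m : List (List Int)} {i j a b : Nat} (hne : i ≠ a ∨ j ≠ b) (v : Int) :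
    get2N (pvSet2 m (i : Int) (j : Int) v) a b = get2N m a b := by
  simp only [get2N, pvSet2, Int.toNat_natCast, List.getD_eq_getElem?_getD, List.getElem?_modify]
  rcases hm : m[a]? with _ | row
  · simp
  · by_cases hia : i = a
    · subst hia
      have hj : j ≠ b := by tauto
      simp [hj]
    · simp [hia]

-- "cell (L,R) already filled" after col diagonals done plus k cells of diagonal col
def fdoneP (col k L R : Nat) : Prop := L ≤ R ∧ (R - L < col ∨ (R - L = col ∧ L < k))

def AInv (arr : List Int) (N col k : Nat) (f s : List (List Int)) : Prop :=
  shapeP N f ∧ shapeP N s ∧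
  ∀ L R, L < N → R < N →
    (fdoneP col k L R → get2N f L R = Fm arr (R - L) L ∧ get2N s L R = Sm arr (R - L) L) ∧
    (¬ fdoneP col k L R → get2N f L R = 0 ∧ get2N s L R = 0)

lemma AInv_succ_col {arr : List Int} {N col : Nat} {f s : List (List Int)}
    (h : AInv arr N col (N - col) f s) : AInv arr N (col + 1) 0 f s := by
  obtain ⟨hf, hs, hv⟩ := h
  refine ⟨hf, hs, fun L R hL hR => ?_⟩
  have hv' := hv L R hL hR
  have hiff : fdoneP (col + 1) 0 L R ↔ fdoneP col (N - col) L R := by unfold fdoneP; omega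
  exact ⟨fun hd => hv'.1 (hiff.mp hd), fun hd => hv'.2 (fun h' => hd (hiff.mpr h'))⟩

lemma get2N_replicate0 (N L R : Nat) :
    get2N (List.replicate N (List.replicate N (0 : Int))) L R = 0 := by
  simp only [get2N, List.getD_eq_getElem?_getD, List.getElem?_replicate]
  by_cases hL : L < N <;> by_cases hR : R < N <;> simp [hL, hR]

lemma shapeP_replicate0 (N : Nat) :
    shapeP N (List.replicate N (List.replicate N (0 : Int))) := by
  refine ⟨by simp, fun a ha => ?_⟩
  simp [List.getD_eq_getElem?_getD, ha]

lemma init_partial (arr : List Int) (N : Nat) :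
    ∀ c, c ≤ N →
      shapeP N ((PySem.List.pyRange 0 (c : Int)).foldl (fun f i => pvSet2 f i i (pvIdx arr i))
          (List.replicate N (List.replicate N (0 : Int)))) ∧
      ∀ L R, L < N → R < N →
        (L = R ∧ L < c → get2N ((PySem.List.pyRange 0 (c : Int)).foldl
            (fun f i => pvSet2 f i i (pvIdx arr i))
            (List.replicate N (List.replicate N (0 : Int)))) L R = arr.getD L 0) ∧
        (¬ (L = R ∧ L < c) → get2N ((PySem.List.pyRange 0 (c : Int)).foldl
            (fun f i => pvSet2 f i i (pvIdx arr i))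
            (List.replicate N (List.replicate N (0 : Int)))) L R = 0) := by
  intro c
  induction c with
  | zero =>
    intro _
    refine ⟨shapeP_replicate0 N, fun L R hL hR => ?_⟩
    simp [PySem.List.pyRange, get2N_replicate0]
  | succ c ih =>
    intro hc
    obtain ⟨hsh, hval⟩ := ih (by omega)
    have hrw : PySem.List.pyRange 0 ((c : Int) + 1) =
        PySem.List.pyRange 0 (c : Int) ++ [(c : Int)] :=
      PySem.List.pyRange_one_succ_right (by positivity)
    push_cast
    rw [hrw, List.foldl_append]
    simp only [List.foldl_cons, List.foldl_nil]
    refine ⟨shapeP_set2 hsh c c _, fun L R hL hR => ?_⟩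
    constructor
    · rintro ⟨rfl, hLc⟩
      by_cases hLceq : L = c
      · subst hLceq
        rw [get2N_set2_eq hsh hL hL, pvIdx_natCast]
      · rw [get2N_set2_ne (by omega), (hval L L hL hL).1 ⟨rfl, by omega⟩]
    · intro hnot
      have hne : c ≠ L ∨ c ≠ R := by omega
      rw [get2N_set2_ne hne, (hval L R hL hR).2 (by omega)]

lemma init_inv (arr : List Int) (N : Nat) (_hN : N = arr.length) :
    AInv arr N 1 0
      ((PySem.List.pyRange 0 (N : Int)).foldl (fun f i => pvSet2 f i i (pvIdx arr i))
        (List.replicate N (List.replicate N (0 : Int))))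
      (List.replicate N (List.replicate N (0 : Int))) := by
  obtain ⟨hsh, hval⟩ := init_partial arr N N le_rfl
  refine ⟨hsh, shapeP_replicate0 N, fun L R hL hR => ?_⟩
  constructor
  · intro hd
    have hLR : L = R := by
      rcases hd with ⟨h1, h2 | h2⟩ <;> omega
    subst hLR
    rw [(hval L L hL hL).1 ⟨rfl, by omega⟩, get2N_replicate0]
    simp [Fm, Sm]
  · intro hd
    have hne : ¬ (L = R ∧ L < N) := by
      intro ⟨h1, _⟩
      exact hd ⟨by omega, Or.inl (by omega)⟩
    rw [(hval L R hL hR).2 hne, get2N_replicate0]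
    exact ⟨rfl, rfl⟩

lemma windpWhile_inv (arr : List Int) (N : Nat) (hN : N = arr.length) :
    ∀ (fuel k col : Nat) (f s : List (List Int)), 1 ≤ col → col < N → k + col ≤ N →
      N - col - k ≤ fuel → AInv arr N col k f s →
      AInv arr N (col + 1) 0
        (windpWhile arr (N : Int) fuel (k : Int) ((col + k : Nat) : Int) f s).1
        (windpWhile arr (N : Int) fuel (k : Int) ((col + k : Nat) : Int) f s).2 := by
  intro fuel
  induction fuel with
  | zero =>
    intro k col f s hcol1 hcolN hkcol hfuel hInv
    have hk : k = N - col := by omega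
    subst hk
    simpa [windpWhile] using AInv_succ_col hInv
  | succ fuel ih =>
    intro k col f s hcol1 hcolN hkcol hfuel hInv
    by_cases hend : col + k = N
    · have hcond : ¬ ((k : Int) < (N : Int) ∧ ((col + k : Nat) : Int) < (N : Int)) := by
        push_cast; omega
      have hk : k = N - col := by omega
      subst hk
      rw [windpWhile, if_neg hcond]
      exact AInv_succ_col hInv
    · obtain ⟨c, rfl⟩ : ∃ c, col = c + 1 := ⟨col - 1, by omega⟩
      have hkN : k < N := by omega
      have hRN : c + 1 + k < N := by omega
      have hcond : ((k : Int) < (N : Int) ∧ ((c + 1 + k : Nat) : Int) < (N : Int)) := by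
        push_cast; omega
      obtain ⟨hsf, hss, hv⟩ := hInv
      have e1 : ((k : Int) + 1) = ((k + 1 : Nat) : Int) := by push_cast; ring
      have e2 : (((c + 1 + k : Nat) : Int) - 1) = ((c + k : Nat) : Int) := by push_cast; ring
      have e3 : (((c + 1 + k : Nat) : Int) + 1) = ((c + 1 + (k + 1) : Nat) : Int) := by
        push_cast; ring
      -- the four reads performed by this iteration, expressed through the invariant
      have hs1 : get2N s (k + 1) (c + 1 + k) = Sm arr c (k + 1) := by
        have h := (hv (k + 1) (c + 1 + k) (by omega) hRN).1 ⟨by omega, Or.inl (by omega)⟩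
        have hsub : c + 1 + k - (k + 1) = c := by omega
        rw [hsub] at h; exact h.2
      have hs2 : get2N s k (c + k) = Sm arr c k := by
        have h := (hv k (c + k) hkN (by omega)).1 ⟨by omega, Or.inl (by omega)⟩
        have hsub : c + k - k = c := by omega
        rw [hsub] at h; exact h.2
      have hf1 : get2N f (k + 1) (c + 1 + k) = Fm arr c (k + 1) := by
        have h := (hv (k + 1) (c + 1 + k) (by omega) hRN).1 ⟨by omega, Or.inl (by omega)⟩
        have hsub : c + 1 + k - (k + 1) = c := by omega
        rw [hsub] at h; exact h.1
      have hf2 : get2N f k (c + k) = Fm arr c k := by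
        have h := (hv k (c + k) hkN (by omega)).1 ⟨by omega, Or.inl (by omega)⟩
        have hsub : c + k - k = c := by omega
        rw [hsub] at h; exact h.1
      have hvF : max (arr.getD k 0 + Sm arr c (k + 1)) (arr.getD (c + 1 + k) 0 + Sm arr c k)
          = Fm arr (c + 1) k := by
        have hsub : k + c + 1 = c + 1 + k := by omega
        rw [Fm, hsub]
      -- one unfolding step of the while loop
      rw [windpWhile, if_pos hcond]
      rw [e1, e2, e3]
      simp only [pvGet2_natCast, pvIdx_natCast]
      rw [get2N_set2_ne (m := f) (Or.inl (by omega : k ≠ k + 1)),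
          get2N_set2_ne (m := f) (Or.inr (by omega : c + 1 + k ≠ c + k)),
          hs1, hs2, hf1, hf2, hvF]
      rw [show min (Fm arr c (k + 1)) (Fm arr c k) = Sm arr (c + 1) k from (Sm.eq_def arr (c+1) k).symm]
      -- the invariant after writing cell (k, c+1+k), fed to the induction hypothesis
      refine ih (k + 1) (c + 1) _ _ hcol1 hcolN (by omega) (by omega) ?_
      refine ⟨shapeP_set2 hsf _ _ _, shapeP_set2 hss _ _ _, fun L R hL hR => ?_⟩
      have hvLR := hv L R hL hR
      by_cases hcell : L = k ∧ R = c + 1 + k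
      · obtain ⟨rfl, rfl⟩ := hcell
        constructor
        · intro _
          have hsub : c + 1 + L - L = c + 1 := by omega
          rw [get2N_set2_eq hsf hL hR, get2N_set2_eq hss hL hR, hsub]
          exact ⟨rfl, rfl⟩
        · intro hnd
          exact absurd ⟨by omega, Or.inr ⟨by omega, by omega⟩⟩ hnd
      · have hne : k ≠ L ∨ c + 1 + k ≠ R := by omega
        have hiff : fdoneP (c + 1) (k + 1) L R ↔ fdoneP (c + 1) k L R := by
          unfold fdoneP; omega
        rw [get2N_set2_ne hne, get2N_set2_ne hne]
        exact ⟨fun hd => hvLR.1 (hiff.mp hd), fun hd => hvLR.2 (fun h' => hd (hiff.mpr h'))⟩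

-- outer loop
lemma outer_partial (arr : List Int) (N : Nat) (hN : N = arr.length) :
    ∀ c, c ≤ N - 1 → 1 ≤ N →
      AInv arr N (c + 1) 0
        ((PySem.List.pyRange 1 ((c + 1 : Nat) : Int)).foldl
          (fun (fs : List (List Int) × List (List Int)) col =>
            windpWhile arr (N : Int) arr.length 0 col fs.1 fs.2)
          (((PySem.List.pyRange 0 (N : Int)).foldl (fun f i => pvSet2 f i i (pvIdx arr i))
              (List.replicate N (List.replicate N (0 : Int)))),
           List.replicate N (List.replicate N (0 : Int)))).1
        ((PySem.List.pyRange 1 ((c + 1 : Nat) : Int)).foldl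
          (fun (fs : List (List Int) × List (List Int)) col =>
            windpWhile arr (N : Int) arr.length 0 col fs.1 fs.2)
          (((PySem.List.pyRange 0 (N : Int)).foldl (fun f i => pvSet2 f i i (pvIdx arr i))
              (List.replicate N (List.replicate N (0 : Int)))),
           List.replicate N (List.replicate N (0 : Int)))).2 := by
  intro c
  induction c with
  | zero =>
    intro _ _
    simpa [PySem.List.pyRange] using init_inv arr N hN
  | succ c ih =>
    intro hc hpos
    have hrw : PySem.List.pyRange 1 ((c + 1 + 1 : Nat) : Int) =
        PySem.List.pyRange 1 ((c + 1 : Nat) : Int) ++ [((c + 1 : Nat) : Int)] := by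
      have : ((c + 1 + 1 : Nat) : Int) = ((c + 1 : Nat) : Int) + 1 := by push_cast; ring
      rw [this]
      exact PySem.List.pyRange_one_succ_right (by push_cast; omega)
    rw [hrw, List.foldl_append]
    simp only [List.foldl_cons, List.foldl_nil]
    have hih := ih (by omega) hpos
    have := windpWhile_inv arr N hN arr.length 0 (c + 1) _ _ (by omega) (by omega)
      (by omega) (by omega) hih
    simpa using this

lemma outer_inv (arr : List Int) (N : Nat) (hN : N = arr.length) (hpos : 1 ≤ N) :
    AInv arr N N 0
      ((PySem.List.pyRange 1 (N : Int)).foldl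
        (fun (fs : List (List Int) × List (List Int)) col =>
          windpWhile arr (N : Int) arr.length 0 col fs.1 fs.2)
        (((PySem.List.pyRange 0 (N : Int)).foldl (fun f i => pvSet2 f i i (pvIdx arr i))
            (List.replicate N (List.replicate N (0 : Int)))),
         List.replicate N (List.replicate N (0 : Int)))).1
      ((PySem.List.pyRange 1 (N : Int)).foldl
        (fun (fs : List (List Int) × List (List Int)) col =>
          windpWhile arr (N : Int) arr.length 0 col fs.1 fs.2)
        (((PySem.List.pyRange 0 (N : Int)).foldl (fun f i => pvSet2 f i i (pvIdx arr i))
            (List.replicate N (List.replicate N (0 : Int)))),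
         List.replicate N (List.replicate N (0 : Int)))).2 := by
  have h := outer_partial arr N hN (N - 1) le_rfl hpos
  have hc : N - 1 + 1 = N := by omega
  rw [hc] at h
  exact h

lemma pvGet2_zero_natCast (m : List (List Int)) (j : Nat) :
    pvGet2 m 0 (j : Int) = get2N m 0 j := by
  simpa using pvGet2_natCast m 0 j

lemma windp_eq_spec (arr : List Int) (h : arr ≠ []) :
    windp arr = max (Fm arr (arr.length - 1) 0) (Sm arr (arr.length - 1) 0) := by
  have hN : 1 ≤ arr.length := List.length_pos_iff.mpr h
  obtain ⟨hsf, hss, hv⟩ := outer_inv arr arr.length rfl hN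
  simp only [windp]
  have e : ((arr.length : Int) - 1) = ((arr.length - 1 : Nat) : Int) := by omega
  rw [e, pvGet2_zero_natCast, pvGet2_zero_natCast]
  have h1 := (hv 0 (arr.length - 1) (by omega) (by omega)).1 ⟨by omega, Or.inl (by omega)⟩
  rw [h1.1, h1.2, Nat.sub_zero]

-- ==== B side ====

-- the difference DP value: Dm arr g L = first - second on interval [L, L+g]
def Dm (arr : List Int) : Nat → Nat → Int
  | 0, L => arr.getD L 0
  | g + 1, L => max (arr.getD L 0 - Dm arr g (L + 1)) (arr.getD (L + g + 1) 0 - Dm arr g L)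

-- sum of arr[L .. L+g] through getD
def ISum (arr : List Int) : Nat → Nat → Int
  | 0, L => arr.getD L 0
  | g + 1, L => arr.getD L 0 + ISum arr g (L + 1)

lemma ISum_right (arr : List Int) : ∀ g L, ISum arr (g + 1) L = ISum arr g L + arr.getD (L + g + 1) 0 := by
  intro g
  induction g with
  | zero => intro L; simp [ISum]
  | succ g ih =>
    intro L
    rw [show g + 1 + 1 = (g + 1) + 1 from rfl, ISum, ih (L + 1), ISum]
    have e : L + 1 + g + 1 = L + (g + 1) + 1 := by omega
    rw [e]; ring

lemma FS_sum (arr : List Int) : ∀ g L, Fm arr g L + Sm arr g L = ISum arr g L := by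
  intro g
  induction g with
  | zero => intro L; simp [Fm, Sm, ISum]
  | succ g ih =>
    intro L
    have h1 := ih (L + 1)
    have h2 := ih L
    have hT : arr.getD L 0 + ISum arr g (L + 1) = arr.getD (L + g + 1) 0 + ISum arr g L := by
      have h := ISum_right arr g L
      rw [ISum] at h; omega
    rw [Fm, Sm, ISum]
    simp only [max_def, min_def]
    split_ifs <;> omega

lemma Dm_eq (arr : List Int) : ∀ g L, Dm arr g L = Fm arr g L - Sm arr g L := by
  intro g
  induction g with
  | zero => intro L; simp [Dm, Fm, Sm]
  | succ g ih =>
    intro L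
    have h1 := ih (L + 1)
    have h2 := ih L
    have hs1 := FS_sum arr g (L + 1)
    have hs2 := FS_sum arr g L
    have hT : arr.getD L 0 + ISum arr g (L + 1) = arr.getD (L + g + 1) 0 + ISum arr g L := by
      have h := ISum_right arr g L
      rw [ISum] at h; omega
    rw [Dm, Fm, Sm]
    simp only [max_def, min_def]
    split_ifs <;> omega

-- halves of the closed-form finish
lemma floordiv_two_mul (m : Int) : PySem.Int.floordiv (2 * m) 2 = m := by
  simp [PySem.Int.floordiv]

lemma max_of_sum_diff (a b : Int) : max a b = PySem.Int.floordiv ((a + b) + |a - b|) 2 := by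
  rcases le_total a b with h | h
  · rw [max_eq_right h, abs_of_nonpos (by omega), show a + b + -(a - b) = 2 * b by ring,
      floordiv_two_mul]
  · rw [max_eq_left h, abs_of_nonneg (by omega), show a + b + (a - b) = 2 * a by ring,
      floordiv_two_mul]

lemma getD_of_drop_cons {arr : List Int} {L : Nat} {x : Int} {xs : List Int}
    (hd : arr.drop L = x :: xs) : arr.getD L 0 = x := by
  have h0 : arr[L + 0]? = some x := by
    rw [← List.getElem?_drop, hd]; rfl
  simp only [Nat.add_zero] at h0
  simp [List.getD_eq_getElem?_getD, h0]

lemma ISum_take (arr : List Int) : ∀ g L, L + g + 1 ≤ arr.length →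
    ISum arr g L = (((arr.drop L).take (g + 1)).sum) := by
  intro g
  induction g with
  | zero =>
    intro L hL
    rcases hd : arr.drop L with _ | ⟨x, xs⟩
    · have := List.length_drop (l := arr) (i := L); rw [hd] at this; simp at this; omega
    · rw [ISum, getD_of_drop_cons hd]; simp
  | succ g ih =>
    intro L hL
    rcases hd : arr.drop L with _ | ⟨x, xs⟩
    · have := List.length_drop (l := arr) (i := L); rw [hd] at this; simp at this; omega
    · have hxs : arr.drop (L + 1) = xs := by
        rw [← List.tail_drop, hd]; rfl
      rw [ISum, ih (L + 1) (by omega), getD_of_drop_cons hd, hxs]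
      simp

lemma ISum_full (arr : List Int) (h : arr ≠ []) : ISum arr (arr.length - 1) 0 = arr.sum := by
  have hN : 1 ≤ arr.length := List.length_pos_iff.mpr h
  rw [ISum_take arr (arr.length - 1) 0 (by omega)]
  simp [show arr.length - 1 + 1 = arr.length by omega]

-- the rolling array after processing interval lengths 2 .. g+1
lemma alt_partial (arr : List Int) (N : Nat) (hN : N = arr.length) :
    ∀ g, g ≤ N - 1 → 1 ≤ N →
      (PySem.List.pyRange 2 ((g + 2 : Nat) : Int)).foldl
        (fun (d : List Int) len =>
          (PySem.List.pyRange 0 ((N : Int) - len + 1)).map (fun L =>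
            max (pvIdx arr L - pvIdx d (L + 1)) (pvIdx arr (L + len - 1) - pvIdx d L)))
        arr =
      (List.range (N - g)).map (fun L => Dm arr g L) := by
  intro g
  induction g with
  | zero =>
    intro _ hpos
    have h1 : arr = (List.range (N - 0)).map (fun L => Dm arr 0 L) := by
      refine List.ext_getElem (by simp [hN]) (fun i h1 h2 => ?_)
      simp only [List.getElem_map, List.getElem_range, Dm]
      simp [List.getD_eq_getElem?_getD, List.getElem?_eq_getElem h1]
    rw [show ((0 + 2 : Nat) : Int) = 2 by norm_num]
    simp only [PySem.List.pyRange]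
    rw [← h1]
    simp
  | succ g ih =>
    intro hg hpos
    have hrw : PySem.List.pyRange 2 ((g + 1 + 2 : Nat) : Int) =
        PySem.List.pyRange 2 ((g + 2 : Nat) : Int) ++ [((g + 2 : Nat) : Int)] := by
      have : ((g + 1 + 2 : Nat) : Int) = ((g + 2 : Nat) : Int) + 1 := by push_cast; ring
      rw [this]
      exact PySem.List.pyRange_one_succ_right (by push_cast; omega)
    rw [hrw, List.foldl_append, ih (by omega) hpos]
    simp only [List.foldl_cons, List.foldl_nil]
    have erange : ((N : Int) - ((g + 2 : Nat) : Int) + 1) = ((N - (g + 1) : Nat) : Int) := by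
      omega
    rw [erange, PySem.List.pyRange_zero_natCast, List.map_map]
    refine List.map_congr_left (fun L hL => ?_)
    have hLlt : L < N - (g + 1) := List.mem_range.mp hL
    simp only [Function.comp_apply]
    have eL1 : ((L : Int) + 1) = ((L + 1 : Nat) : Int) := by push_cast; ring
    have eL2 : ((L : Int) + ((g + 2 : Nat) : Int) - 1) = ((L + g + 1 : Nat) : Int) := by
      push_cast; ring
    rw [eL1, eL2, pvIdx_natCast, pvIdx_natCast, pvIdx_natCast, pvIdx_natCast,
       PySem.List.getD_map_range _ _ _ _ (by omega),
       PySem.List.getD_map_range _ _ _ _ (by omega), Dm]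

lemma pvIdx_zero (xs : List Int) : pvIdx xs 0 = xs.getD 0 0 := by
  simpa using pvIdx_natCast xs 0

lemma windp_alt_eq_spec (arr : List Int) (h : arr ≠ []) :
    windp_alt arr = max (Fm arr (arr.length - 1) 0) (Sm arr (arr.length - 1) 0) := by
  have hN : 1 ≤ arr.length := List.length_pos_iff.mpr h
  simp only [windp_alt]
  have e : ((arr.length : Int) + 1) = ((arr.length - 1 + 2 : Nat) : Int) := by omega
  rw [e, alt_partial arr arr.length rfl (arr.length - 1) le_rfl hN]
  have e1 : arr.length - (arr.length - 1) = 1 := by omega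
  rw [e1]
  simp only [List.range_one, List.map_cons, List.map_nil, pvIdx_zero, List.getD_cons_zero]
  rw [Dm_eq, ← ISum_full arr h, ← FS_sum arr (arr.length - 1) 0]
  exact (max_of_sum_diff _ _).symm

-- ===== VERDICT (by name: the statement is the Claim_ definition above) =====
theorem windp_spec : Claim_equal_windp := by
  intro arr _ hpre
  unfold Spec_windp
  rw [windp_eq_spec arr hpre, windp_alt_eq_spec arr hpre]
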